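-- pv_equiv track=rewrite | github.com/git-kai/proofread-latex-paper | libs/latex_manager.py | get_tex_preamble_body_references
-- ===== SOURCE A (Python) =====
-- def get_tex_preamble_body_references(in_text):
--     this_preamble = ''
--     this_body = ''
--     this_references = ''
--     all_lines = in_text.splitlines()
--     is_preamble = True
--     is_references = False
--     for this_line in all_lines:
--         # Check where the line belongs to
--         if this_line.startswith('\\begin{document}'):
--             is_preamble = False
--         elif this_line.startswith('\\bibliographystyle') or this_line.startswith('\\begin{thebibliography}'):
--             is_references = True
--         # Add the line to the appropriate section
--         if is_preamble:
--             this_preamble += this_line + '\n'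
--         elif is_references:
--             this_references += this_line + '\n'
--         else:
--             this_body += this_line + '\n'
--     return {'preamble': this_preamble, 'body': this_body, 'references': this_references}
-- ===== SOURCE B (Python) =====
-- def get_tex_preamble_body_references(in_text):
--     lines = in_text.splitlines()
--     n = len(lines)
--     p = next((i for i, l in enumerate(lines) if l.startswith('\\begin{document}')), n)
--     r = next((i for i, l in enumerate(lines)
--               if l.startswith('\\bibliographystyle') or l.startswith('\\begin{thebibliography}')), n)
--     s = max(p, r)
--     join = lambda seg: ''.join(l + '\n' for l in seg)
--     return {'preamble': join(lines[:p]),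
--             'body': join(lines[p:s]),
--             'references': join(lines[s:])}
-- ===== Notes on version B (the rewrite author's own statement) =====
-- stated objective: simpler
-- what changed: Replaces the per-line two-flag state machine with computing the two boundary indices (first '\begin{document}' line, first bibliography-marker line) and slicing the line list at p and max(p,r), joining each slice.
import Mathlib
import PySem

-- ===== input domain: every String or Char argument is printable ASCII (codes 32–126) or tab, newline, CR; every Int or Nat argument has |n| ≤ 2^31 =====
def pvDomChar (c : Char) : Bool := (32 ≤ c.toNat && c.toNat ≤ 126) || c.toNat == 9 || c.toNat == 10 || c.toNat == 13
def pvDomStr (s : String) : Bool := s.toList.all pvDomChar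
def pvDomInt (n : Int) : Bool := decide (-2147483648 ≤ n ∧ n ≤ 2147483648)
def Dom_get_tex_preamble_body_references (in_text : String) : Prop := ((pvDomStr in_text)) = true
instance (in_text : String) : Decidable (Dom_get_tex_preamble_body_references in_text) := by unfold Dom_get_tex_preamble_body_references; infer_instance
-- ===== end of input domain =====

-- B replaces A's per-line two-flag state machine by computing the two boundary indices and slicing; objective: simpler.

-- ===== PORT A =====
def aStep (st : String × String × String × Bool × Bool) (this_line : String) :
    String × String × String × Bool × Bool :=
  let (pre, body, refs, ip, ir) := st
  let fl :=
    if PySem.Str.startswith this_line "\\begin{document}" then (false, ir)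
    else if PySem.Str.startswith this_line "\\bibliographystyle" ||
            PySem.Str.startswith this_line "\\begin{thebibliography}" then (ip, true)
    else (ip, ir)
  if fl.1 then (pre ++ this_line ++ "\n", body, refs, fl.1, fl.2)
  else if fl.2 then (pre, body, refs ++ this_line ++ "\n", fl.1, fl.2)
  else (pre, body ++ this_line ++ "\n", refs, fl.1, fl.2)

def get_tex_preamble_body_references (in_text : String) : List (String × String) :=
  let all_lines := PySem.Str.splitlines in_text
  let st := all_lines.foldl aStep ("", "", "", true, false)
  [("preamble", st.1), ("body", st.2.1), ("references", st.2.2.1)]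

-- ===== PORT B =====
-- ''.join(l + '\n' for l in seg)
def joinNl (seg : List String) : String := String.join (seg.map (fun l => l ++ "\n"))

def get_tex_preamble_body_references_alt (in_text : String) : List (String × String) :=
  let lines := PySem.Str.splitlines in_text
  -- next((i for i,l in enumerate(lines) if ...), n): List.findIdx returns lines.length when no line matches
  let p := lines.findIdx (fun l => PySem.Str.startswith l "\\begin{document}")
  let r := lines.findIdx (fun l => PySem.Str.startswith l "\\bibliographystyle" ||
                                   PySem.Str.startswith l "\\begin{thebibliography}")
  let s := max p r
  -- lines[:p], lines[p:s], lines[s:] with 0 ≤ p ≤ s ≤ n, ported exactly by take/drop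
  [("preamble", joinNl (lines.take p)),
   ("body", joinNl ((lines.drop p).take (s - p))),
   ("references", joinNl (lines.drop s))]

-- ===== PRECONDITION & SPEC =====
def Spec_get_tex_preamble_body_references (in_text : String) (out : List (String × String)) : Prop := out = get_tex_preamble_body_references_alt in_text
instance (in_text : String) (out : List (String × String)) : Decidable (Spec_get_tex_preamble_body_references in_text out) := by unfold Spec_get_tex_preamble_body_references; infer_instance

-- ===== CLAIM (what is proved, stated in full; the proofs are below) =====
def Claim_equal_get_tex_preamble_body_references : Prop := ∀ (in_text : String), Dom_get_tex_preamble_body_references in_text → Spec_get_tex_preamble_body_references in_text (get_tex_preamble_body_references in_text)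

-- ===== LEMMAS AND PROOFS =====

def pdB (l : String) : Bool := PySem.Str.startswith l "\\begin{document}"
def pbB (l : String) : Bool := PySem.Str.startswith l "\\bibliographystyle" ||
                               PySem.Str.startswith l "\\begin{thebibliography}"

theorem joinNl_nil : joinNl [] = "" := rfl

theorem joinNl_cons (l : String) (ls : List String) :
    joinNl (l :: ls) = l ++ "\n" ++ joinNl ls := by
  apply String.ext; simp [joinNl, String.join_eq, String.append_assoc]

-- no line starts with both '\begin{document}' and a bibliography marker
theorem pd_pb_disjoint (l : String) (h : pdB l = true) : pbB l = false := by
  simp only [pdB, pbB, PySem.Str.startswith_eq] at *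
  rw [PySem.Chars.startswith_iff] at h
  simp only [Bool.or_eq_false_iff]
  constructor <;> {
    rw [Bool.eq_false_iff, Ne, PySem.Chars.startswith_iff]
    intro h2
    rcases List.prefix_or_prefix_of_prefix h h2 with hp | hp <;> revert hp <;> decide }

-- from state (is_preamble = false, is_references = true): every line goes to references
theorem foldl_S3 (ls : List String) (a b c : String) :
    ls.foldl aStep (a, b, c, false, true) = (a, b, c ++ joinNl ls, false, true) := by
  induction ls generalizing c with
  | nil => simp [joinNl_nil, String.append_empty]
  | cons l t ih => simp [aStep, joinNl_cons, ih, String.append_assoc]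

-- from state (false, false): body until the first bibliography marker, then references
theorem foldl_S2 (ls : List String) (a b c : String) :
    ls.foldl aStep (a, b, c, false, false) =
      (a, b ++ joinNl (ls.take (ls.findIdx pbB)), c ++ joinNl (ls.drop (ls.findIdx pbB)),
        false, decide (ls.findIdx pbB < ls.length)) := by
  induction ls generalizing b c with
  | nil => simp [joinNl_nil, String.append_empty]
  | cons l t ih =>
    by_cases hb : pbB l = true
    · have hd : pdB l = false := by
        by_contra h; simp [pd_pb_disjoint l (by simpa using h)] at hb
      simp [pdB, PySem.Str.startswith_eq] at hd
      simp [pbB, PySem.Str.startswith_eq] at hb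
      rcases hb with hb | hb <;>
        simp [aStep, hd, hb, List.findIdx_cons, pbB, foldl_S3, joinNl_cons, joinNl_nil,
              String.append_assoc, String.append_empty, PySem.Str.startswith_eq]
    · have hb' := hb
      simp [pbB, PySem.Str.startswith_eq, Bool.or_eq_true, not_or, Bool.not_eq_true] at hb'
      by_cases hd : pdB l = true
      all_goals simp [pdB, PySem.Str.startswith_eq, Bool.not_eq_true] at hd
      all_goals simp [aStep, hd, hb'.1, hb'.2, List.findIdx_cons, pbB, ih, joinNl_cons,
              String.append_assoc]

-- from state (true, true): preamble until the first '\begin{document}', then references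
theorem foldl_S1 (ls : List String) (a b c : String) :
    ls.foldl aStep (a, b, c, true, true) =
      (a ++ joinNl (ls.take (ls.findIdx pdB)), b, c ++ joinNl (ls.drop (ls.findIdx pdB)),
        !decide (ls.findIdx pdB < ls.length), true) := by
  induction ls generalizing a c with
  | nil => simp [joinNl_nil, String.append_empty]
  | cons l t ih =>
    by_cases hd : pdB l = true
    · simp [pdB, PySem.Str.startswith_eq] at hd
      simp [aStep, hd, List.findIdx_cons, pdB, foldl_S3, joinNl_cons, joinNl_nil,
            String.append_assoc, String.append_empty, PySem.Str.startswith_eq]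
    · simp [pdB, PySem.Str.startswith_eq] at hd
      simp [aStep, hd, List.findIdx_cons, pdB, ih, joinNl_cons,
            String.append_assoc, PySem.Str.startswith_eq]

-- initial state (true, false): A's whole loop, characterised by the two boundary indices
theorem foldl_S0 (ls : List String) (a b c : String) :
    ls.foldl aStep (a, b, c, true, false) =
      (a ++ joinNl (ls.take (ls.findIdx pdB)),
       b ++ joinNl ((ls.drop (ls.findIdx pdB)).take (max (ls.findIdx pdB) (ls.findIdx pbB) - ls.findIdx pdB)),
       c ++ joinNl (ls.drop (max (ls.findIdx pdB) (ls.findIdx pbB))),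
       !decide (ls.findIdx pdB < ls.length), decide (ls.findIdx pbB < ls.length)) := by
  induction ls generalizing a b c with
  | nil => simp [joinNl_nil, String.append_empty]
  | cons l t ih =>
    by_cases hd : pdB l = true
    · have hb : pbB l = false := pd_pb_disjoint l hd
      simp [pbB, PySem.Str.startswith_eq] at hb
      simp [pdB, PySem.Str.startswith_eq] at hd
      simp [aStep, hd, hb.1, hb.2, List.findIdx_cons, pdB, pbB, foldl_S2, joinNl_cons, joinNl_nil,
            String.append_assoc, String.append_empty, PySem.Str.startswith_eq]
    · by_cases hb : pbB l = true
      · simp [pdB, PySem.Str.startswith_eq] at hd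
        simp [pbB, PySem.Str.startswith_eq] at hb
        rcases hb with hb | hb <;>
          simp [aStep, hd, hb, List.findIdx_cons, pdB, pbB, foldl_S1, joinNl_cons, joinNl_nil,
                String.append_assoc, String.append_empty, PySem.Str.startswith_eq]
      · simp [pdB, PySem.Str.startswith_eq] at hd
        simp [pbB, PySem.Str.startswith_eq] at hb
        simp [aStep, hd, hb.1, hb.2, List.findIdx_cons, pdB, pbB, ih, joinNl_cons,
              String.append_assoc, PySem.Str.startswith_eq, Nat.succ_max_succ]

-- ===== VERDICT (by name: the statement is the Claim_ definition above) =====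
theorem get_tex_preamble_body_references_spec : Claim_equal_get_tex_preamble_body_references := by
  intro in_text _
  unfold Spec_get_tex_preamble_body_references
  unfold get_tex_preamble_body_references get_tex_preamble_body_references_alt
  simp only [foldl_S0]
  unfold pdB pbB
  simp [String.empty_append]
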